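-- pv_equiv track=rewrite | github.com/toozej/sn2ssg-py | sn2ssg.py | _split_notes
-- ===== SOURCE A (Python) =====
-- def _split_notes(input_lines: list[str]) -> [list[str]]:
--     """
--     Splits the input lines into separate notes using header lines as delimiters.
--
--     :param input_lines: List of strings, each representing a line from the input.
--     :return: A list of notes, where each note is a list of strings.
--     """
--     # uses "ending" header (ends with "-+") lines as delimiters between notes
--     output_notes = []
--     note = []
--     header_start_found = False
--     header_end_found = False
--     for line in input_lines:
--         if line.endswith("-+") and header_start_found is True and header_end_found is True:
--             # add current temp note to list of notes
--             output_notes.append(note)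
--             # cut a new note
--             note = []
--             header_start_found = True
--             header_end_found = False
--             note.append(line)
--         else:
--             if line.endswith("-+") and header_start_found is False:
--                 header_start_found = True
--             elif line.endswith("-+") and header_start_found is True and header_end_found is False:
--                 header_end_found = True
--             # add line to current temp note
--             note.append(line)
--
--     # since we're basing spitting of notes on headers, we won't have a way to store the last note
--     # so explicitly store the last note
--     output_notes.append(note)
--     return output_notes
-- ===== SOURCE B (Python) =====
-- def _split_notes(input_lines: list[str]) -> [list[str]]:
--     """Recursive splitter: cut before the 3rd "-+" header line, recurse on the rest."""
--     count = 0
--     for i, line in enumerate(input_lines):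
--         if line.endswith("-+"):
--             count += 1
--             if count == 3:
--                 return [input_lines[:i]] + _split_notes(input_lines[i:])
--     return [input_lines]
-- ===== Notes on version B (the rewrite author's own statement) =====
-- stated objective: simpler
-- what changed: Replaced A's single-pass state machine with two boolean header flags and a mutating accumulator by a short recursive splitter: find the index of the 3rd line ending in "-+" and cut the list there, recursing on the remainder (which starts with a header line, so later cuts fall on the 5th, 7th, ... header exactly as A's flags do).
import Mathlib
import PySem

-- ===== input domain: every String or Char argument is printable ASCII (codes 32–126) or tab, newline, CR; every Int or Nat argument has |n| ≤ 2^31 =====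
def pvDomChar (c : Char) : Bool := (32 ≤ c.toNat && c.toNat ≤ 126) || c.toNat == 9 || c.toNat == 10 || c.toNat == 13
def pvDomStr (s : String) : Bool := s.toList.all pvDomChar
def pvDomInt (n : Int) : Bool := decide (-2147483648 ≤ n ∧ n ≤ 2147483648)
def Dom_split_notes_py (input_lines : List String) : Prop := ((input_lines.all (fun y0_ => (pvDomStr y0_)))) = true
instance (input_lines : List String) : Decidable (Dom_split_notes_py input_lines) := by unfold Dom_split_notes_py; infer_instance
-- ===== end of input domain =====

-- B replaces A's four-flag state machine by a recursive splitter (cut before the 3rd "-+" line,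
-- recurse on the rest); objective: simpler, same O(n) cost.

-- ===== PORT A =====
-- A's for-loop over (output_notes, note, header_start_found, header_end_found), branch for branch.
def splitLoopA : List String → List (List String) → List String → Bool → Bool → List (List String)
  | [], out, note, _, _ => out ++ [note]
  | l :: ls, out, note, hs, he =>
    if PySem.Str.endswith l "-+" && hs && he then
      splitLoopA ls (out ++ [note]) [l] true false
    else if PySem.Str.endswith l "-+" && !hs then
      splitLoopA ls out (note ++ [l]) true he
    else if PySem.Str.endswith l "-+" && hs && !he then
      splitLoopA ls out (note ++ [l]) hs true
    else
      splitLoopA ls out (note ++ [l]) hs he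

def split_notes_py (input_lines : List String) : List (List String) :=
  splitLoopA input_lines [] [] false false

-- ===== PORT B =====
-- Source B's scan for the index of the 3rd "-+" line (i = running index, count = headers seen so far).
def thirdHeaderIdx : List String → Nat → Nat → Option Nat
  | [], _, _ => none
  | l :: ls, i, count =>
    if PySem.Str.endswith l "-+" then
      if count + 1 == 3 then some i else thirdHeaderIdx ls (i + 1) (count + 1)
    else thirdHeaderIdx ls (i + 1) count

theorem thirdHeaderIdx_ge : ∀ (ls : List String) (i c j : Nat),
    thirdHeaderIdx ls i c = some j → i ≤ j ∧ j < i + ls.length := by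
  intro ls
  induction ls with
  | nil => intro i c j h; simp [thirdHeaderIdx] at h
  | cons l ls ih =>
    intro i c j h
    simp only [thirdHeaderIdx] at h
    split_ifs at h with h1 h2
    · cases h; simp only [List.length_cons]; omega
    · have := ih (i + 1) (c + 1) j h; simp only [List.length_cons]; omega
    · have := ih (i + 1) c j h; simp only [List.length_cons]; omega

theorem thirdHeaderIdx_pos : ∀ (ls : List String) (j : Nat),
    thirdHeaderIdx ls 0 0 = some j → 0 < j ∧ j < ls.length := by
  intro ls j h
  match ls with
  | [] => simp [thirdHeaderIdx] at h
  | l :: ls =>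
    simp only [thirdHeaderIdx] at h
    split_ifs at h with h1 h2
    · exact absurd h2 (by decide)
    · have := thirdHeaderIdx_ge ls 1 1 j h; simp only [List.length_cons]; omega
    · have := thirdHeaderIdx_ge ls 1 0 j h; simp only [List.length_cons]; omega

def split_notes_py_alt (input_lines : List String) : List (List String) :=
  match h : thirdHeaderIdx input_lines 0 0 with
  | none => [input_lines]
  | some i => input_lines.take i :: split_notes_py_alt (input_lines.drop i)
termination_by input_lines.length
decreasing_by
  have := thirdHeaderIdx_pos input_lines i h
  simp only [List.length_drop]; omega

-- ===== PRECONDITION & SPEC =====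
def Spec_split_notes_py (input_lines : List String) (out : List (List String)) : Prop := out = split_notes_py_alt input_lines
instance (input_lines : List String) (out : List (List String)) : Decidable (Spec_split_notes_py input_lines out) := by unfold Spec_split_notes_py; infer_instance

-- ===== CLAIM (what is proved, stated in full; the proofs are below) =====
def Claim_equal_split_notes_py : Prop := ∀ (input_lines : List String), Dom_split_notes_py input_lines → Spec_split_notes_py input_lines (split_notes_py input_lines)

-- ===== LEMMAS AND PROOFS =====

-- non-dependent unfolding equation for the well-founded recursion of split_notes_py_alt
theorem alt_eq (ls : List String) :
    split_notes_py_alt ls =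
      match thirdHeaderIdx ls 0 0 with
      | none => [ls]
      | some i => ls.take i :: split_notes_py_alt (ls.drop i) := by
  rw [split_notes_py_alt]
  rcases hj : thirdHeaderIdx ls 0 0 with _ | j
  · simp
  · simp

-- shift the running index of thirdHeaderIdx
theorem thirdHeaderIdx_shift : ∀ (ls : List String) (i c : Nat),
    thirdHeaderIdx ls (i + 1) c = (thirdHeaderIdx ls i c).map (· + 1) := by
  intro ls
  induction ls with
  | nil => intro i c; simp [thirdHeaderIdx]
  | cons l ls ih =>
    intro i c
    simp only [thirdHeaderIdx]
    split_ifs <;> simp [ih]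

-- the tail that splitLoopA still has to produce, as a function of the current note and the
-- number c of header lines already seen in the current segment
def segTail (c : Nat) (note ls : List String) : List (List String) :=
  match thirdHeaderIdx ls 0 c with
  | none => [note ++ ls]
  | some i => (note ++ ls.take i) :: split_notes_py_alt (ls.drop i)

theorem alt_cons_header (l : String) (ls : List String)
    (hc : PySem.Chars.endswith l.toList ['-', '+'] = true) :
    split_notes_py_alt (l :: ls) = segTail 1 [l] ls := by
  have e : thirdHeaderIdx (l :: ls) 0 0 = (thirdHeaderIdx ls 0 1).map (· + 1) := by
    simp [thirdHeaderIdx, hc, thirdHeaderIdx_shift]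
  rw [alt_eq (l :: ls), e]
  unfold segTail
  rcases hj : thirdHeaderIdx ls 0 1 with _ | j
  · simp
  · simp

theorem segTail_cons_header (c : Nat) (note ls : List String) (l : String)
    (hclt : c + 1 < 3) (hc : PySem.Chars.endswith l.toList ['-', '+'] = true) :
    segTail c note (l :: ls) = segTail (c + 1) (note ++ [l]) ls := by
  have e : thirdHeaderIdx (l :: ls) 0 c = (thirdHeaderIdx ls 0 (c + 1)).map (· + 1) := by
    have hne : ¬ (c + 1 == 3) = true := by simp; omega
    simp [thirdHeaderIdx, hc, hne, thirdHeaderIdx_shift]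
  unfold segTail
  rw [e]
  rcases hj : thirdHeaderIdx ls 0 (c + 1) with _ | j
  · simp
  · simp

theorem segTail_cons_plain (c : Nat) (note ls : List String) (l : String)
    (hc : PySem.Chars.endswith l.toList ['-', '+'] = false) :
    segTail c note (l :: ls) = segTail c (note ++ [l]) ls := by
  have e : thirdHeaderIdx (l :: ls) 0 c = (thirdHeaderIdx ls 0 c).map (· + 1) := by
    simp [thirdHeaderIdx, hc, thirdHeaderIdx_shift]
  unfold segTail
  rw [e]
  rcases hj : thirdHeaderIdx ls 0 c with _ | j
  · simp
  · simp

-- the main invariant: A's loop in each reachable state produces out ++ segTail c note ls,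
-- where (hs, he) = (false,false) ↔ c = 0, (true,false) ↔ c = 1, (true,true) ↔ c = 2
theorem loopA_segTail : ∀ (ls : List String) (out : List (List String)) (note : List String),
    splitLoopA ls out note true true = out ++ segTail 2 note ls ∧
    splitLoopA ls out note true false = out ++ segTail 1 note ls ∧
    splitLoopA ls out note false false = out ++ segTail 0 note ls := by
  intro ls
  induction ls with
  | nil =>
    intro out note
    refine ⟨?_, ?_, ?_⟩ <;> simp [splitLoopA, segTail, thirdHeaderIdx]
  | cons l ls ih =>
    intro out note
    by_cases h : PySem.Chars.endswith l.toList ['-', '+'] = true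
    · refine ⟨?_, ?_, ?_⟩
      · -- state (true, true): split
        have e : thirdHeaderIdx (l :: ls) 0 2 = some 0 := by simp [thirdHeaderIdx, h]
        simp only [splitLoopA]
        simp [h]
        rw [(ih (out ++ [note]) [l]).2.1]
        simp [segTail, e, alt_cons_header l ls h]
      · -- state (true, false): header_end_found := true
        simp only [splitLoopA]
        simp [h]
        rw [(ih out (note ++ [l])).1, segTail_cons_header 1 note ls l (by omega) h]
      · -- state (false, false): header_start_found := true
        simp only [splitLoopA]
        simp [h]
        rw [(ih out (note ++ [l])).2.1, segTail_cons_header 0 note ls l (by omega) h]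
    · have h' : PySem.Chars.endswith l.toList ['-', '+'] = false := by simpa using h
      refine ⟨?_, ?_, ?_⟩ <;>
        · simp only [splitLoopA]
          simp [h']
          first
            | rw [(ih out (note ++ [l])).1, segTail_cons_plain 2 note ls l h']
            | rw [(ih out (note ++ [l])).2.1, segTail_cons_plain 1 note ls l h']
            | rw [(ih out (note ++ [l])).2.2, segTail_cons_plain 0 note ls l h']

theorem segTail_zero_nil (ls : List String) : segTail 0 [] ls = split_notes_py_alt ls := by
  rw [alt_eq ls]
  unfold segTail
  rcases hj : thirdHeaderIdx ls 0 0 with _ | j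
  · simp
  · simp

-- ===== VERDICT (by name: the statement is the Claim_ definition above) =====
theorem split_notes_py_spec : Claim_equal_split_notes_py := by
  intro input_lines _
  unfold Spec_split_notes_py split_notes_py
  rw [(loopA_segTail input_lines [] []).2.2, segTail_zero_nil]
  simp
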